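-- pv_equiv track=rewrite | github.com/neochen2701/TQCPans | 練習題組/挑戰題答案檔/CSF-009.py | sumCount
-- ===== SOURCE A (Python) =====
-- def sumCount(nums1, nums2, nums3, price):
--     numDict = {}
--     for i in nums1:
--         for j in nums2:
--             if i + j not in numDict:
--                 numDict[i + j] = 1
--             else:
--                 numDict[i + j] += 1
--     for i in nums2:
--         for j in nums3:
--             if i + j not in numDict:
--                 numDict[i + j] = 1
--             else:
--                 numDict[i + j] += 1
--     for i in nums1:
--         for j in nums3:
--             if i + j not in numDict:
--                 numDict[i + j] = 1
--             else:
--                 numDict[i + j] += 1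
--
--     total = 0
--     for key, value in numDict.items():
--         if key <= price:
--             total += value
--
--     return total
-- ===== SOURCE B (Python) =====
-- def sumCount(nums1, nums2, nums3, price):
--     def count_le(xs, ys):
--         s = sorted(xs)
--         n = len(s)
--         total = 0
--         for y in ys:
--             t = price - y
--             lo, hi = 0, n
--             while lo < hi:
--                 mid = (lo + hi) // 2
--                 if s[mid] <= t:
--                     lo = mid + 1
--                 else:
--                     hi = mid
--             total += lo
--         return total
--     return count_le(nums1, nums2) + count_le(nums2, nums3) + count_le(nums1, nums3)
-- ===== Notes on version B (the rewrite author's own statement) =====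
-- stated objective: faster
-- what changed: Replaced the O(n*m)-per-pairing dict of sum counts by sorting one list of each pairing and counting partners with a hand-written binary search per element of the other list, O((n+m) log n) per pairing.
import Mathlib
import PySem

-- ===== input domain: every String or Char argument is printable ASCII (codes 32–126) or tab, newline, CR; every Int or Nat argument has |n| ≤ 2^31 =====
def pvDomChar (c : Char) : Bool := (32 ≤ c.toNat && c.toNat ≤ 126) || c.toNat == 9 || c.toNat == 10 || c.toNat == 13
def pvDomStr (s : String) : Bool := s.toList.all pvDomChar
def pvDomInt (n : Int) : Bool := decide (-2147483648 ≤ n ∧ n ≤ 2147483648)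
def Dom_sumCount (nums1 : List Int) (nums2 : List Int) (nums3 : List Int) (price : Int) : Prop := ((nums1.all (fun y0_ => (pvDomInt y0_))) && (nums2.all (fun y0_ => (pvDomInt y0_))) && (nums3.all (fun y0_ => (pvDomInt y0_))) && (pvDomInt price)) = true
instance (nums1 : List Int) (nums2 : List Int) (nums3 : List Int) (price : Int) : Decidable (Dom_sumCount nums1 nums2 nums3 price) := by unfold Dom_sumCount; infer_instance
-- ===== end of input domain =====

-- B counts pairs with sum ≤ price directly: it sorts one list of each pairing and binary-searches
-- the partner bound for each element of the other list, instead of A's dict of all pairwise sums.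

-- ===== PORT A =====
def sumCount (nums1 : List Int) (nums2 : List Int) (nums3 : List Int) (price : Int) : Int :=
  let d0 : PySem.Dict Int Int := PySem.Dict.empty
  let d1 := nums1.foldl (fun d i => nums2.foldl (fun d j =>
      if d.contains (i + j) = false then d.insert (i + j) 1 else d.modify (i + j) 0 (· + 1)) d) d0
  let d2 := nums2.foldl (fun d i => nums3.foldl (fun d j =>
      if d.contains (i + j) = false then d.insert (i + j) 1 else d.modify (i + j) 0 (· + 1)) d) d1
  let d3 := nums1.foldl (fun d i => nums3.foldl (fun d j =>
      if d.contains (i + j) = false then d.insert (i + j) 1 else d.modify (i + j) 0 (· + 1)) d) d2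
  d3.items.foldl (fun total kv => if kv.1 ≤ price then total + kv.2 else total) 0

-- ===== PORT B =====
-- the hand-written 'while lo < hi' binary search of Source B; lo, hi are nonnegative Python ints,
-- kept as Nat ((lo+hi)//2 on nonneg ints is Nat division; s[mid] with 0 ≤ mid < len is s.getD mid 0)
def bsLoop (s : List Int) (t : Int) (lo hi : Nat) : Nat :=
  if _h : lo < hi then
    if s.getD ((lo + hi) / 2) 0 ≤ t then bsLoop s t ((lo + hi) / 2 + 1) hi
    else bsLoop s t lo ((lo + hi) / 2)
  else lo
termination_by hi - lo
decreasing_by all_goals omega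

def countLE (xs : List Int) (ys : List Int) (price : Int) : Int :=
  let s := PySem.List.sorted xs (fun x => x) false
  let n := s.length
  ys.foldl (fun total y => total + (bsLoop s (price - y) 0 n : Int)) 0

def sumCount_alt (nums1 : List Int) (nums2 : List Int) (nums3 : List Int) (price : Int) : Int :=
  countLE nums1 nums2 price + countLE nums2 nums3 price + countLE nums1 nums3 price

-- ===== PRECONDITION & SPEC =====
def Spec_sumCount (nums1 : List Int) (nums2 : List Int) (nums3 : List Int) (price : Int) (out : Int) : Prop := out = sumCount_alt nums1 nums2 nums3 price
instance (nums1 : List Int) (nums2 : List Int) (nums3 : List Int) (price : Int) (out : Int) : Decidable (Spec_sumCount nums1 nums2 nums3 price out) := by unfold Spec_sumCount; infer_instance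

-- ===== CLAIM (what is proved, stated in full; the proofs are below) =====
def Claim_equal_sumCount : Prop := ∀ (nums1 : List Int) (nums2 : List Int) (nums3 : List Int) (price : Int), Dom_sumCount nums1 nums2 nums3 price → Spec_sumCount nums1 nums2 nums3 price (sumCount nums1 nums2 nums3 price)

-- ===== LEMMAS AND PROOFS =====

-- the multiset of cross sums of one pairing
def sumsOf (xs ys : List Int) : List Int := xs.flatMap (fun i => ys.map (fun j => i + j))

-- A's update step is exactly the Counter step
theorem step_eq_modify (d : PySem.Dict Int Int) (x : Int) :
    (if d.contains x = false then d.insert x 1 else d.modify x 0 (· + 1)) = d.modify x 0 (· + 1) := by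
  split
  · next h =>
    show d.insert x 1 = d.insert x (d.getD x 0 + 1)
    rw [PySem.Dict.getD_of_not_contains d 0 h]
    norm_num
  · rfl

theorem nested_fold_eq_counter_fold (xs ys : List Int) (d : PySem.Dict Int Int) :
    xs.foldl (fun d i => ys.foldl (fun d j =>
      if d.contains (i + j) = false then d.insert (i + j) 1 else d.modify (i + j) 0 (· + 1)) d) d
    = (sumsOf xs ys).foldl (fun d x => d.modify x 0 (· + 1)) d := by
  rw [sumsOf, List.foldl_flatMap]
  refine List.foldl_ext _ _ d (fun d' i _ => ?_)
  rw [List.foldl_map]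
  exact List.foldl_ext _ _ d' (fun d'' j _ => step_eq_modify d'' (i + j))

-- one exact hit in a nodup list
theorem sum_map_single_hit (K : List Int) (x : Int) (c : Int) (hnd : K.Nodup) (hx : x ∈ K) :
    (K.map (fun k => if x = k then c else 0)).sum = c := by
  induction K with
  | nil => cases hx
  | cons a K ih =>
    rcases List.mem_cons.mp hx with h | h
    · have hz : (K.map (fun k => if x = k then c else 0)).sum = 0 := by
        refine List.sum_eq_zero (fun y hy => ?_)
        rcases List.mem_map.mp hy with ⟨k, hk, rfl⟩
        have : x ≠ k := fun e => (List.nodup_cons.mp hnd).1 (h ▸ e ▸ hk)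
        simp [this]
      simp [← h, hz]
    · have hne : x ≠ a := fun e => (List.nodup_cons.mp hnd).1 (e ▸ h)
      simp [hne, ih (List.nodup_cons.mp hnd).2 h]

-- summing counts of the ≤-price keys over any nodup cover of L counts the ≤-price elements of L
theorem sum_counts_eq_countP (K : List Int) (price : Int) :
    ∀ (L : List Int), K.Nodup → (∀ x ∈ L, x ∈ K) →
    (K.map (fun k => if k ≤ price then (L.count k : Int) else 0)).sum
      = (L.countP (fun x => x ≤ price) : Int) := by
  intro L
  induction L with
  | nil => intro _ _; simp
  | cons x L ih =>
    intro hnd hcov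
    have hx : x ∈ K := hcov x (List.mem_cons_self)
    have hrec := ih hnd (fun y hy => hcov y (List.mem_cons_of_mem x hy))
    have hsplit : ∀ k : Int, (if k ≤ price then ((x :: L).count k : Int) else 0)
        = (if k ≤ price then (L.count k : Int) else 0)
          + (if x = k then (if k ≤ price then 1 else 0) else 0) := by
      intro k
      rw [List.count_cons]
      by_cases hk : k ≤ price <;> by_cases he : x = k <;> simp [hk, he]
    calc (K.map (fun k => if k ≤ price then ((x :: L).count k : Int) else 0)).sum
        = (K.map (fun k => (if k ≤ price then (L.count k : Int) else 0)
            + (if x = k then (if k ≤ price then 1 else 0) else 0))).sum := by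
          exact congrArg List.sum (List.map_congr_left (fun k _ => hsplit k))
      _ = (K.map (fun k => if k ≤ price then (L.count k : Int) else 0)).sum
            + (K.map (fun k => if x = k then (if k ≤ price then 1 else 0) else 0)).sum :=
          PySem.List.sum_map_add_int K _ _
      _ = (L.countP (fun x => x ≤ price) : Int) + (if x ≤ price then 1 else 0) := by
          rw [hrec]
          congr 1
          have := sum_map_single_hit K x (if x ≤ price then 1 else 0) hnd hx
          rw [← this]
          exact congrArg List.sum (List.map_congr_left (by
            intro k _
            by_cases he : x = k
            · subst he; simp
            · simp [he]))
      _ = ((x :: L).countP (fun x => x ≤ price) : Int) := by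
          rw [List.countP_cons]
          by_cases hx' : x ≤ price <;> simp [hx']

-- A computes the number of cross sums ≤ price
theorem sumCount_eq_countP (nums1 nums2 nums3 : List Int) (price : Int) :
    sumCount nums1 nums2 nums3 price
      = ((sumsOf nums1 nums2 ++ sumsOf nums2 nums3 ++ sumsOf nums1 nums3).countP
          (fun x => x ≤ price) : Int) := by
  unfold sumCount
  dsimp only
  rw [nested_fold_eq_counter_fold, nested_fold_eq_counter_fold, nested_fold_eq_counter_fold,
      ← List.foldl_append, ← List.foldl_append, ← PySem.Dict.counter_eq_foldl]
  rw [← List.append_assoc]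
  set L := sumsOf nums1 nums2 ++ sumsOf nums2 nums3 ++ sumsOf nums1 nums3 with hL
  have hnd := PySem.Dict.nodup_keys_counter L
  rw [PySem.Dict.items_eq_map_keys _ hnd 0]
  have hfun : (fun (total : Int) (kv : Int × Int) => if kv.1 ≤ price then total + kv.2 else total)
      = (fun total kv => total + (if kv.1 ≤ price then kv.2 else 0)) := by
    funext total kv; split <;> simp
  rw [hfun, PySem.List.foldl_add, List.map_map]
  have : ((PySem.Dict.counter L).keys.map
        (fun k => if k ≤ price then ((PySem.Dict.counter L).getD k 0) else 0)).sum
      = ((PySem.Dict.counter L).keys.map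
        (fun k => if k ≤ price then (L.count k : Int) else 0)).sum := by
    exact congrArg List.sum (List.map_congr_left (fun k _ => by
      rw [PySem.Dict.getD_counter]))
  simp only [Function.comp_def]
  rw [this, sum_counts_eq_countP _ price L hnd (fun x hx => by
    rw [PySem.Dict.keys_counter]; exact (PySem.Set.mem_ofList L x).mpr hx), zero_add]

-- at lo = hi the invariants pin the count of elements ≤ t to lo
theorem countP_eq_of_split (s : List Int) (t : Int) (lo : Nat) (hls : lo ≤ s.length)
    (hlow : ∀ k, k < lo → ∃ hk : k < s.length, s[k] ≤ t)
    (hhigh : ∀ k (hk : k < s.length), lo ≤ k → ¬ s[k] ≤ t) :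
    s.countP (fun x => x ≤ t) = lo := by
  rw [show s.countP (fun x => x ≤ t) = (s.take lo).countP (fun x => x ≤ t)
        + (s.drop lo).countP (fun x => x ≤ t) by rw [← List.countP_append, List.take_append_drop]]
  have hlen : (s.take lo).length = lo := by rw [List.length_take]; omega
  have h1 : (s.take lo).countP (fun x => x ≤ t) = lo := by
    rw [List.countP_eq_length.mpr, hlen]
    intro a ha
    rcases List.mem_iff_getElem.mp ha with ⟨i, hi', rfl⟩
    rw [List.getElem_take]
    rcases hlow i (by omega) with ⟨_, hle⟩
    simpa using hle
  have h2 : (s.drop lo).countP (fun x => x ≤ t) = 0 := by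
    rw [List.countP_eq_zero]
    intro a ha
    rcases List.mem_iff_getElem.mp ha with ⟨i, hi', rfl⟩
    rw [List.getElem_drop]
    have := hhigh (lo + i) (by rw [List.length_drop] at hi'; omega) (by omega)
    simpa using this
  omega

-- binary-search loop invariant: on a sorted list it lands on the count of elements ≤ t
theorem bsLoop_spec (s : List Int) (t : Int) (hs : s.Pairwise (· ≤ ·)) :
    ∀ (fuel lo hi : Nat), hi - lo ≤ fuel → lo ≤ hi → hi ≤ s.length →
    (∀ k, k < lo → ∃ hk : k < s.length, s[k] ≤ t) →
    (∀ k (hk : k < s.length), hi ≤ k → ¬ s[k] ≤ t) →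
    bsLoop s t lo hi = s.countP (fun x => x ≤ t) := by
  intro fuel
  induction fuel with
  | zero =>
    intro lo hi hf hlh hhs hlow hhigh
    have hlo : lo = hi := by omega
    subst hlo
    rw [bsLoop]; simp only [lt_irrefl, dite_false]
    exact (countP_eq_of_split s t lo (by omega) hlow hhigh).symm
  | succ fuel ih =>
    intro lo hi hf hlh hhs hlow hhigh
    rw [bsLoop]
    by_cases h : lo < hi
    · simp only [h, dite_true]
      have hmid1 : lo ≤ (lo + hi) / 2 := by omega
      have hmid2 : (lo + hi) / 2 < hi := by omega
      have hmlen : (lo + hi) / 2 < s.length := by omega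
      rw [List.getD_eq_getElem s 0 hmlen]
      by_cases hm : s[(lo + hi) / 2] ≤ t
      · simp only [hm, if_true]
        refine ih ((lo + hi) / 2 + 1) hi (by omega) (by omega) hhs ?_ hhigh
        intro k hk
        have hkl : k < s.length := by omega
        refine ⟨hkl, ?_⟩
        rcases Nat.lt_or_ge k ((lo + hi) / 2) with hlt | hge
        · exact le_trans (List.pairwise_iff_getElem.mp hs k _ hkl hmlen hlt) hm
        · have : k = (lo + hi) / 2 := by omega
          subst this; exact hm
      · simp only [hm, if_false]
        refine ih lo ((lo + hi) / 2) (by omega) (by omega) (by omega) hlow ?_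
        intro k hk hge
        rcases Nat.lt_or_ge ((lo + hi) / 2) k with hlt | hge'
        · intro hle
          exact hm (le_trans (List.pairwise_iff_getElem.mp hs _ k hmlen hk hlt) hle)
        · have : k = (lo + hi) / 2 := by omega
          subst this; exact hm
    · simp only [h, dite_false]
      have hlo : lo = hi := by omega
      subst hlo
      exact (countP_eq_of_split s t lo (by omega) hlow hhigh).symm


-- one pairing of B counts that pairing's cross sums ≤ price
theorem countLE_eq_countP (xs ys : List Int) (price : Int) :
    countLE xs ys price = (ys.map (fun y => ((xs.countP (fun x => x + y ≤ price)) : Int))).sum := by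
  unfold countLE
  dsimp only
  rw [PySem.List.foldl_add, zero_add]
  refine congrArg List.sum (List.map_congr_left (fun y _ => ?_))
  set s := PySem.List.sorted xs (fun x => x) false with hsdef
  have hsorted : s.Pairwise (· ≤ ·) := PySem.List.sorted_pairwise xs (fun x => x)
  have hperm : s.Perm xs := PySem.List.sorted_perm xs (fun x => x) false
  rw [bsLoop_spec s (price - y) hsorted (s.length - 0) 0 s.length (by omega) (by omega) le_rfl
        (by intro k hk; omega) (by intro k hk hge; omega)]
  rw [hperm.countP_eq]
  congr 1
  refine List.countP_congr (fun x _ => ?_)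
  constructor <;> intro h <;> [skip; skip] <;> simp_all <;> omega

-- Fubini: summing per-y counts over xs equals summing per-x counts over ys
theorem count_swap (xs ys : List Int) (price : Int) :
    (ys.map (fun y => ((xs.countP (fun x => x + y ≤ price)) : Int))).sum
      = (xs.map (fun x => ((ys.countP (fun y => x + y ≤ price)) : Int))).sum := by
  induction xs with
  | nil => simp
  | cons x xs ih =>
    have : (fun y => (((x :: xs).countP (fun x => x + y ≤ price)) : Int))
        = (fun y => (xs.countP (fun x => x + y ≤ price) : Int)
            + (if x + y ≤ price then 1 else 0)) := by
      funext y
      rw [List.countP_cons]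
      by_cases h : x + y ≤ price <;> simp [h]
    rw [this, PySem.List.sum_map_add_int, ih, List.map_cons, List.sum_cons]
    have hz := PySem.List.sum_map_ite_one_zero (fun y => decide (x + y ≤ price)) ys
    simp only [decide_eq_true_eq] at hz
    rw [hz]; ring

-- cross-sum count of a pairing, reorganised to B's per-y shape
theorem countP_sumsOf (xs ys : List Int) (price : Int) :
    ((sumsOf xs ys).countP (fun x => x ≤ price) : Int)
      = (xs.map (fun x => ((ys.countP (fun y => x + y ≤ price)) : Int))).sum := by
  rw [sumsOf, List.countP_flatMap]
  push_cast
  refine congrArg List.sum ?_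
  rw [List.map_map]
  refine List.map_congr_left (fun i _ => ?_)
  simp only [Function.comp, List.countP_map]
  rfl

-- ===== VERDICT (by name: the statement is the Claim_ definition above) =====
theorem sumCount_spec : Claim_equal_sumCount := by
  intro nums1 nums2 nums3 price _
  show sumCount nums1 nums2 nums3 price = sumCount_alt nums1 nums2 nums3 price
  rw [sumCount_eq_countP]
  unfold sumCount_alt
  rw [countLE_eq_countP, countLE_eq_countP, countLE_eq_countP,
      count_swap, count_swap, count_swap,
      List.countP_append, List.countP_append]
  push_cast
  rw [countP_sumsOf, countP_sumsOf, countP_sumsOf]
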